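-- pv_equiv track=rewrite | github.com/amimami-P/amiToolsMaya | amiTools/model/RelPathConverter/RelPathConverter.py | find_deepest_common_folder_name
-- ===== SOURCE A (Python) =====
-- def find_deepest_common_folder_name(path1, path2):
--     path1_parts = path1.replace("\\", "/").split("/")
--     path2_parts = path2.replace("\\", "/").split("/")
--
--     # 共通するフォルダ名を取得
--     common_folders = set(path1_parts) & set(path2_parts)
--     # path1の中で一番深い共通フォルダを探す
--     deepest_folder = None
--
--     for folder in reversed(path1_parts):
--         if folder in common_folders:
--             deepest_folder = folder
--             break
--     return deepest_folder
-- ===== SOURCE B (Python) =====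
-- def find_deepest_common_folder_name(path1, path2):
--     parts1 = path1.replace("\\", "/").split("/")
--     last_index = {name: i for i, name in enumerate(parts1)}
--     best = -1
--     for name in path2.replace("\\", "/").split("/"):
--         i = last_index.get(name, -1)
--         if i > best:
--             best = i
--     return None if best < 0 else parts1[best]
-- ===== Notes on version B (the rewrite author's own statement) =====
-- stated objective: alternative
-- what changed: B indexes path1's parts by last position in a dict built once, then scans path2's parts maximizing that index and returns parts1[best], instead of A's intersection set plus reverse scan of path1 with break.
import Mathlib
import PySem

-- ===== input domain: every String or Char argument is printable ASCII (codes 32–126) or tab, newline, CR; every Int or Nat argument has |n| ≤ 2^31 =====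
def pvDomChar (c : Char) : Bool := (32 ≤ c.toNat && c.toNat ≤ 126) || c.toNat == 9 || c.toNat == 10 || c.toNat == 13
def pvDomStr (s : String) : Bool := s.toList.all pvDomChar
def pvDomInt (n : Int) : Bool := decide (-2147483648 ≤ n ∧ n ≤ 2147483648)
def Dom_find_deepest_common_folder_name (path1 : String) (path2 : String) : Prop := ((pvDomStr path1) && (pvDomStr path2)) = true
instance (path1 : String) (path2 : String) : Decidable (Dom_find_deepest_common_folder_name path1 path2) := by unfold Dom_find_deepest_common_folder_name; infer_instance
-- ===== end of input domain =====

-- B replaces A's intersection-set + reverse scan with break by a last-index dict of path1's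
-- parts and a max-index scan over path2's parts, returning parts1[best]; return values proved equal.

-- ===== PORT A =====
-- the 'for folder in reversed(path1_parts): if …: deepest = folder; break' loop
def pvALoop (common : PySem.Set String) : List String → Option String
  | [] => none
  | f :: rest => if PySem.Set.contains common f then some f else pvALoop common rest

def find_deepest_common_folder_name (path1 : String) (path2 : String) : Option String :=
  let path1_parts := (PySem.Str.split? (PySem.Str.replace path1 "\\" "/") "/").getD []
  let path2_parts := (PySem.Str.split? (PySem.Str.replace path2 "\\" "/") "/").getD []
  let common_folders := PySem.Set.inter (PySem.Set.ofList path1_parts) (PySem.Set.ofList path2_parts)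
  pvALoop common_folders path1_parts.reverse

-- ===== PORT B =====
def find_deepest_common_folder_name_alt (path1 : String) (path2 : String) : Option String :=
  let parts1 := (PySem.Str.split? (PySem.Str.replace path1 "\\" "/") "/").getD []
  -- {name: i for i, name in enumerate(parts1)}
  let last_index := (PySem.List.enumerate parts1 0).foldl
    (fun d p => PySem.Dict.insert d p.2 p.1) PySem.Dict.empty
  -- for name in parts2: i = last_index.get(name, -1); if i > best: best = i
  let best := ((PySem.Str.split? (PySem.Str.replace path2 "\\" "/") "/").getD []).foldl
    (fun b name =>
      let i := PySem.Dict.getD last_index name (-1)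
      if i > b then i else b) (-1)
  if best < 0 then none else PySem.List.pyGet? parts1 best

-- ===== PRECONDITION & SPEC =====
def Spec_find_deepest_common_folder_name (path1 : String) (path2 : String) (out : Option String) : Prop := out = find_deepest_common_folder_name_alt path1 path2
instance (path1 : String) (path2 : String) (out : Option String) : Decidable (Spec_find_deepest_common_folder_name path1 path2 out) := by unfold Spec_find_deepest_common_folder_name; infer_instance

-- ===== CLAIM (what is proved, stated in full; the proofs are below) =====
def Claim_equal_find_deepest_common_folder_name : Prop := ∀ (path1 : String) (path2 : String), Dom_find_deepest_common_folder_name path1 path2 → Spec_find_deepest_common_folder_name path1 path2 (find_deepest_common_folder_name path1 path2)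

-- ===== LEMMAS AND PROOFS =====

-- the dict built by B from parts1 (as a function of the part list)
def pvDictOf (l : List String) : PySem.Dict String Int :=
  (PySem.List.enumerate l 0).foldl (fun d p => PySem.Dict.insert d p.2 p.1) PySem.Dict.empty

-- B's inner max fold (g = lookup in the dict, parametrised for the proofs)
def pvBest (g : String → Int) (l : List String) (b : Int) : Int :=
  l.foldl (fun b name => let i := g name; if i > b then i else b) b

theorem pvALoop_eq_find? (common : PySem.Set String) (l : List String) :
    pvALoop common l = l.find? (fun f => PySem.Set.contains common f) := by
  induction l with
  | nil => rfl
  | cons f rest ih =>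
      simp only [pvALoop, List.find?, ih]
      cases h : PySem.Set.contains common f <;> simp

theorem pvPred_agree (l1 l2 : List String) (f : String) (hf : f ∈ l1) :
    PySem.Set.contains (PySem.Set.inter (PySem.Set.ofList l1) (PySem.Set.ofList l2)) f
      = PySem.Set.contains (PySem.Set.ofList l2) f := by
  cases h : PySem.Set.contains (PySem.Set.ofList l2) f
  · rw [Bool.eq_false_iff]; intro hc
    rw [PySem.Set.contains_iff _ _, PySem.Set.mem_inter] at hc
    exact (Bool.eq_false_iff.mp h) ((PySem.Set.contains_iff _ _).mpr hc.2)
  · rw [PySem.Set.contains_iff _ _, PySem.Set.mem_inter, PySem.Set.mem_ofList]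
    exact ⟨hf, (PySem.Set.contains_iff _ _).mp h⟩

theorem pvFind?_congr (p q : String → Bool) (l : List String)
    (h : ∀ f ∈ l, p f = q f) : l.find? p = l.find? q := by
  induction l with
  | nil => rfl
  | cons f rest ih =>
      simp only [List.find?]
      rw [h f (by simp)]
      cases q f
      · exact ih (fun g hg => h g (by simp [hg]))
      · rfl

-- snoc step of the dict: getD on (xs ++ [x]) is an if over getD on xs
theorem pvDictOf_snoc (xs : List String) (x : String) (n : String) :
    (pvDictOf (xs ++ [x])).getD n (-1)
      = if n = x then (xs.length : Int) else (pvDictOf xs).getD n (-1) := by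
  unfold pvDictOf
  rw [PySem.List.enumerate_append, List.foldl_append]
  simp only [PySem.List.enumerate_cons, PySem.List.enumerate_nil, List.foldl_cons, List.foldl_nil]
  rw [PySem.Dict.getD_insert]
  simp

theorem pvDictOf_nil (n : String) : (pvDictOf []).getD n (-1) = -1 := by
  simp [pvDictOf, PySem.List.enumerate_nil]

-- dict values are bounded above: getD < length
theorem pvDictOf_ub (l : List String) (n : String) : (pvDictOf l).getD n (-1) < (l.length : Int) := by
  induction l using List.reverseRecOn with
  | nil => simp [pvDictOf_nil]
  | append_singleton xs x ih =>
      have hlen : (((xs ++ [x]).length : Nat) : Int) = (xs.length : Int) + 1 := by simp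
      rw [pvDictOf_snoc, hlen]
      split_ifs with h
      · omega
      · have := ih; omega

-- pvBest facts
theorem pvBest_congr (g g' : String → Int) (l : List String) (b : Int)
    (h : ∀ n ∈ l, g n = g' n) : pvBest g l b = pvBest g' l b := by
  induction l generalizing b with
  | nil => rfl
  | cons n rest ih =>
      simp only [pvBest, List.foldl_cons]
      rw [h n (by simp)]
      exact ih _ (fun m hm => h m (by simp [hm]))

theorem pvBest_le (g : String → Int) (l : List String) (b c : Int)
    (hg : ∀ n ∈ l, g n ≤ c) (hb : b ≤ c) : pvBest g l b ≤ c := by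
  induction l generalizing b with
  | nil => exact hb
  | cons n rest ih =>
      simp only [pvBest, List.foldl_cons]
      exact ih _ (fun m hm => hg m (by simp [hm]))
        (by have h1 := hg n (by simp); split_ifs <;> omega)

theorem pvBest_ge_init (g : String → Int) (l : List String) (b : Int) : b ≤ pvBest g l b := by
  induction l generalizing b with
  | nil => exact le_refl _
  | cons n rest ih =>
      simp only [pvBest, List.foldl_cons]
      have h1 := ih (if g n > b then g n else b)
      have h2 : b ≤ (if g n > b then g n else b) := by split_ifs <;> omega
      exact le_trans h2 h1

theorem pvBest_ge_mem (g : String → Int) (l : List String) (b : Int) (x : String) (hx : x ∈ l) :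
    g x ≤ pvBest g l b := by
  induction l generalizing b with
  | nil => simp at hx
  | cons n rest ih =>
      simp only [pvBest, List.foldl_cons]
      rcases List.mem_cons.mp hx with h | h
      · subst h
        have h2 : g x ≤ (if g x > b then g x else b) := by split_ifs <;> omega
        exact le_trans h2 (pvBest_ge_init g rest _)
      · exact ih _ h

-- main equivalence: A's reverse-scan find? equals B's best-index computation, by snoc induction on parts1
theorem pvMain (l2 l1 : List String) :
    l1.reverse.find? (fun f => PySem.Set.contains (PySem.Set.ofList l2) f)
      = (if pvBest (fun n => (pvDictOf l1).getD n (-1)) l2 (-1) < 0 then none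
         else PySem.List.pyGet? l1 (pvBest (fun n => (pvDictOf l1).getD n (-1)) l2 (-1))) := by
  induction l1 using List.reverseRecOn with
  | nil =>
      have h1 : pvBest (fun n => (pvDictOf ([] : List String)).getD n (-1)) l2 (-1) ≤ -1 :=
        pvBest_le _ _ _ _ (fun n _ => by simp [pvDictOf_nil]) (le_refl _)
      simp only [List.reverse_nil, List.find?_nil]
      rw [if_pos (by omega)]
  | append_singleton xs x ih =>
      have hg : ∀ n, (pvDictOf (xs ++ [x])).getD n (-1)
          = if n = x then (xs.length : Int) else (pvDictOf xs).getD n (-1) := pvDictOf_snoc xs x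
      rw [List.reverse_append]
      simp only [List.reverse_cons, List.reverse_nil, List.nil_append, List.singleton_append]
      by_cases hx : x ∈ l2
      · -- x is common: A returns x; B's best = len xs
        have hcx : PySem.Set.contains (PySem.Set.ofList l2) x = true :=
          (PySem.Set.contains_iff _ _).mpr ((PySem.Set.mem_ofList _ _).mpr hx)
        rw [List.find?_cons_of_pos (by simpa using hcx)]
        have hub : ∀ n ∈ l2, (pvDictOf (xs ++ [x])).getD n (-1) ≤ (xs.length : Int) := by
          intro n _
          rw [hg n]; split_ifs with h
          · exact le_refl _
          · have := pvDictOf_ub xs n; omega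
        have hge : (xs.length : Int) ≤ pvBest (fun n => (pvDictOf (xs ++ [x])).getD n (-1)) l2 (-1) := by
          have h := pvBest_ge_mem (fun n => (pvDictOf (xs ++ [x])).getD n (-1)) l2 (-1) x hx
          simpa [hg x] using h
        have hle : pvBest (fun n => (pvDictOf (xs ++ [x])).getD n (-1)) l2 (-1) ≤ (xs.length : Int) :=
          pvBest_le _ _ _ _ hub (by omega)
        have hbest : pvBest (fun n => (pvDictOf (xs ++ [x])).getD n (-1)) l2 (-1) = (xs.length : Int) :=
          le_antisymm hle hge
        rw [hbest, if_neg (by omega)]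
        rw [PySem.List.pyGet?_natCast]
        rw [List.getElem?_concat_length]
      · -- x is not common: the new dict agrees with the old on l2, so best is unchanged
        have hcx : PySem.Set.contains (PySem.Set.ofList l2) x = false := by
          rw [Bool.eq_false_iff]; intro hc
          exact hx ((PySem.Set.mem_ofList _ _).mp ((PySem.Set.contains_iff _ _).mp hc))
        rw [List.find?_cons_of_neg (by simpa using hcx)]
        have heq : pvBest (fun n => (pvDictOf (xs ++ [x])).getD n (-1)) l2 (-1)
            = pvBest (fun n => (pvDictOf xs).getD n (-1)) l2 (-1) := by
          apply pvBest_congr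
          intro n hn
          rw [hg n, if_neg (by rintro rfl; exact hx hn)]
        rw [heq, ih]
        by_cases hneg : pvBest (fun n => (pvDictOf xs).getD n (-1)) l2 (-1) < 0
        · rw [if_pos hneg, if_pos hneg]
        · rw [if_neg hneg, if_neg hneg]
          -- best is a valid index into xs, so lookup in xs ++ [x] agrees with lookup in xs
          have hub2 : pvBest (fun n => (pvDictOf xs).getD n (-1)) l2 (-1) ≤ (xs.length : Int) - 1 :=
            pvBest_le _ _ _ _ (fun n _ => by have := pvDictOf_ub xs n; omega) (by omega)
          obtain ⟨m, hm⟩ := Int.eq_ofNat_of_zero_le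
            (show (0:Int) ≤ pvBest (fun n => (pvDictOf xs).getD n (-1)) l2 (-1) by omega)
          rw [hm] at hub2 ⊢
          have hmlt : m < xs.length := by omega
          rw [PySem.List.pyGet?_natCast, PySem.List.pyGet?_natCast]
          rw [List.getElem?_append_left hmlt]

-- ===== VERDICT (by name: the statement is the Claim_ definition above) =====
theorem find_deepest_common_folder_name_spec : Claim_equal_find_deepest_common_folder_name := by
  intro path1 path2 _
  unfold Spec_find_deepest_common_folder_name
  unfold find_deepest_common_folder_name find_deepest_common_folder_name_alt
  set l1 := (PySem.Str.split? (PySem.Str.replace path1 "\\" "/") "/").getD [] with hl1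
  set l2 := (PySem.Str.split? (PySem.Str.replace path2 "\\" "/") "/").getD [] with hl2
  rw [pvALoop_eq_find?]
  rw [pvFind?_congr _ (fun f => PySem.Set.contains (PySem.Set.ofList l2) f) l1.reverse
        (fun f hf => pvPred_agree l1 l2 f (by simpa using hf))]
  exact pvMain l2 l1
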